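-- pv_equiv track=rewrite | github.com/HVPA/Portal | search/views/variant.py | ConvertToSymbols
-- ===== SOURCE A (Python) =====
-- def ConvertToSymbols(variant_string):
--     count = 0
--     while count < len(variant_string):
--         if variant_string[count] == '.':
--             if variant_string[count:count+4] == '.qm.':
--                 variant_string = variant_string[:count] + '?' + variant_string[count+4:]
--                 count += 1
--             elif variant_string[count:count+4] == '.us.':
--                 variant_string = variant_string[:count] + '_' + variant_string[count+4:]
--                 count += 1
--             elif variant_string[count:count+4] == '.gt.':
--                 variant_string = variant_string[:count] + '>' + variant_string[count+4:]
--                 count += 1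
--             elif variant_string[count:count+4] == '.wc.':
--                 variant_string = variant_string[:count] + '*' + variant_string[count+4:]
--                 count += 1
--             elif variant_string[count:count+4] == '.sc.':
--                 variant_string = variant_string[:count] + ':' + variant_string[count+4:]
--                 count += 1
--             elif variant_string[count:count+4] == '.cm.':
--                 variant_string = variant_string[:count] + ',' + variant_string[count+4:]
--                 count += 1
--             else:
--                 count += 1
--         else:
--             count += 1
--
--     return variant_string
-- ===== SOURCE B (Python) =====
-- def ConvertToSymbols(variant_string):
--     symbols = {'.qm.': '?', '.us.': '_', '.gt.': '>', '.wc.': '*', '.sc.': ':', '.cm.': ','}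
--     out = []
--     i = 0
--     n = len(variant_string)
--     while i < n:
--         sym = symbols.get(variant_string[i:i+4])
--         if sym is not None:
--             out.append(sym)
--             i += 4
--         else:
--             out.append(variant_string[i])
--             i += 1
--     return ''.join(out)
-- ===== Notes on version B (the rewrite author's own statement) =====
-- stated objective: alternative
-- what changed: Replaced the rescanning while-loop that splices the symbol into the string and re-traverses it with a single left-to-right pass that looks each 4-char window up in a dict and emits either the symbol (advance 4) or the current character (advance 1) into an output buffer; it trades A's in-place string rebuilding (worst-case quadratic) for a per-character buffer loop of the same measured cost on typical inputs.
import Mathlib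
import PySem

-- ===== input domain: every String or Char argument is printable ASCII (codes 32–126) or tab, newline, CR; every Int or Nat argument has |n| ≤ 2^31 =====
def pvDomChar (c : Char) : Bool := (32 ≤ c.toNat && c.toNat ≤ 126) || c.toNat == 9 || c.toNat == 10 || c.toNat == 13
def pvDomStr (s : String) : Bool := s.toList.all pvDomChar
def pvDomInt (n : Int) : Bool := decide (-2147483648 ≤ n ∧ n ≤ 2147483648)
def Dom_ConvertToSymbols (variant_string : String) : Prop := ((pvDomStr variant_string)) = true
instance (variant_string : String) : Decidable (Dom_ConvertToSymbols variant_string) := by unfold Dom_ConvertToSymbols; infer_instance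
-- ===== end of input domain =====

-- B replaces A's rescanning while-loop (which rebuilds the string on every token hit) with one
-- left-to-right pass over the input, emitting to a buffer (alternative decomposition; same return value).


-- s[i:i+4] as drop/take (used by port A's termination proof via conv_window_len)
lemma conv_slice_eq (s : List Char) (i : Nat) :
    PySem.List.slice s (some (i : Int)) (some ((i : Int) + 4)) = (s.drop i).take 4 := by
  have h : ((i : Int) + 4) = ((i + 4 : Nat) : Int) := by push_cast; ring
  rw [h, PySem.List.slice_natCast]
  congr 1
  omega

-- a matched 4-char window means 4 more characters from i on (termination helper for port A)
lemma conv_window_len {s : List Char} {i : Nat} {t : List Char}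
    (h : PySem.List.slice s (some (i : Int)) (some ((i : Int) + 4)) = t) (ht : t.length = 4) :
    i + 4 ≤ s.length := by
  have hl := congrArg List.length h
  rw [conv_slice_eq] at hl
  simp at hl
  omega

-- ===== PORT A =====
-- A's loop: while count < len(s): inspect s[count]; on '.' compare s[count:count+4] against the six
-- tokens in order, splice the symbol into s (s = s[:count] + sym + s[count+4:]) and advance 1; else advance 1.
def convLoopA (s : List Char) (count : Nat) : List Char :=
  if h : count < s.length then
    if s[count] = '.' then
      if h1 : PySem.List.slice s (some (count : Int)) (some ((count : Int) + 4)) = ['.','q','m','.'] then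
        convLoopA (s.take count ++ '?' :: s.drop (count + 4)) (count + 1)
      else if h2 : PySem.List.slice s (some (count : Int)) (some ((count : Int) + 4)) = ['.','u','s','.'] then
        convLoopA (s.take count ++ '_' :: s.drop (count + 4)) (count + 1)
      else if h3 : PySem.List.slice s (some (count : Int)) (some ((count : Int) + 4)) = ['.','g','t','.'] then
        convLoopA (s.take count ++ '>' :: s.drop (count + 4)) (count + 1)
      else if h4 : PySem.List.slice s (some (count : Int)) (some ((count : Int) + 4)) = ['.','w','c','.'] then
        convLoopA (s.take count ++ '*' :: s.drop (count + 4)) (count + 1)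
      else if h5 : PySem.List.slice s (some (count : Int)) (some ((count : Int) + 4)) = ['.','s','c','.'] then
        convLoopA (s.take count ++ ':' :: s.drop (count + 4)) (count + 1)
      else if h6 : PySem.List.slice s (some (count : Int)) (some ((count : Int) + 4)) = ['.','c','m','.'] then
        convLoopA (s.take count ++ ',' :: s.drop (count + 4)) (count + 1)
      else
        convLoopA s (count + 1)
    else
      convLoopA s (count + 1)
  else s
termination_by s.length - count
decreasing_by
  all_goals (try have hb : count + 4 ≤ s.length := conv_window_len (by assumption) rfl)
  all_goals (try simp only [List.length_append, List.length_take, List.length_cons, List.length_drop])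
  all_goals omega

def ConvertToSymbols (variant_string : String) : String :=
  String.ofList (convLoopA variant_string.toList 0)

-- ===== PORT B =====
-- Source B's dict of token → symbol
def convSymbols : PySem.Dict (List Char) Char :=
  PySem.Dict.ofList [(['.','q','m','.'], '?'), (['.','u','s','.'], '_'),
                     (['.','g','t','.'], '>'), (['.','w','c','.'], '*'),
                     (['.','s','c','.'], ':'), (['.','c','m','.'], ',')]

-- Source B's while-loop: look s[i:i+4] up; emit the symbol and advance 4, or emit s[i] and advance 1.
def convLoopB (s : List Char) (i : Nat) : List Char :=
  if h : i < s.length then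
    match convSymbols.get? (PySem.List.slice s (some (i : Int)) (some ((i : Int) + 4))) with
    | some sym => sym :: convLoopB s (i + 4)
    | none => s[i] :: convLoopB s (i + 1)
  else []
termination_by s.length - i
decreasing_by all_goals omega

def ConvertToSymbols_alt (variant_string : String) : String :=
  String.ofList (convLoopB variant_string.toList 0)

-- ===== PRECONDITION & SPEC =====
def Spec_ConvertToSymbols (variant_string : String) (out : String) : Prop := out = ConvertToSymbols_alt variant_string
instance (variant_string : String) (out : String) : Decidable (Spec_ConvertToSymbols variant_string out) := by unfold Spec_ConvertToSymbols; infer_instance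

-- ===== CLAIM (what is proved, stated in full; the proofs are below) =====
def Claim_equal_ConvertToSymbols : Prop := ∀ (variant_string : String), Dom_ConvertToSymbols variant_string → Spec_ConvertToSymbols variant_string (ConvertToSymbols variant_string)

-- ===== LEMMAS AND PROOFS =====

-- the dict lookup, written out as an if-chain
lemma convSymbols_get?_eq (k : List Char) : convSymbols.get? k =
    if ['.','q','m','.'] = k then some '?' else if ['.','u','s','.'] = k then some '_'
    else if ['.','g','t','.'] = k then some '>' else if ['.','w','c','.'] = k then some '*'
    else if ['.','s','c','.'] = k then some ':' else if ['.','c','m','.'] = k then some ',' else none := by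
  simp [convSymbols, PySem.Dict.ofList, PySem.Dict.update, PySem.Dict.get?, PySem.Dict.insert,
        PySem.Dict.empty, List.find?_cons]
  repeat' split <;> simp_all

-- a window not starting with '.' matches no token
lemma convSymbols_get?_none_of_head {c : Char} (rest : List Char) (hc : c ≠ '.') :
    convSymbols.get? ((c :: rest).take 4) = none := by
  rw [convSymbols_get?_eq]
  split_ifs with h1 h2 h3 h4 h5 h6 <;> simp_all [List.take_succ_cons]
  all_goals first
    | exact hc h1.1.symm | exact hc h2.1.symm | exact hc h3.1.symm
    | exact hc h4.1.symm | exact hc h5.1.symm | exact hc h6.1.symm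

-- a window equal to none of the six tokens matches no token
lemma convSymbols_get?_none_of_six {k : List Char}
    (h1 : ¬ k = ['.','q','m','.']) (h2 : ¬ k = ['.','u','s','.']) (h3 : ¬ k = ['.','g','t','.'])
    (h4 : ¬ k = ['.','w','c','.']) (h5 : ¬ k = ['.','s','c','.']) (h6 : ¬ k = ['.','c','m','.']) :
    convSymbols.get? k = none := by
  rw [convSymbols_get?_eq]
  split_ifs with g1 g2 g3 g4 g5 g6
  · exact absurd g1.symm h1
  · exact absurd g2.symm h2
  · exact absurd g3.symm h3
  · exact absurd g4.symm h4
  · exact absurd g5.symm h5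
  · exact absurd g6.symm h6
  · rfl

-- suffix-recursion view of B's loop (proof helper)
def convSuf (s : List Char) : List Char :=
  match s with
  | [] => []
  | c :: rest =>
    match convSymbols.get? ((c :: rest).take 4) with
    | some sym => sym :: convSuf (rest.drop 3)
    | none => c :: convSuf rest
termination_by s.length
decreasing_by all_goals (simp only [List.length_drop, List.length_cons]; omega)

-- peel one step of convSuf at a matched token
lemma convSuf_token {s : List Char} {i : Nat} {sym : Char} (h : i < s.length)
    (hlook : convSymbols.get? (PySem.List.slice s (some (i : Int)) (some ((i : Int) + 4))) = some sym) :
    convSuf (s.drop i) = sym :: convSuf (s.drop (i + 4)) := by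
  have hdrop : s.drop i = s[i] :: s.drop (i + 1) := List.drop_eq_getElem_cons h
  rw [conv_slice_eq, hdrop] at hlook
  rw [hdrop, convSuf]
  simp only [hlook, List.drop_drop]

-- peel one step of convSuf at an unmatched position
lemma convSuf_plain {s : List Char} {i : Nat} (h : i < s.length)
    (hlook : convSymbols.get? (PySem.List.slice s (some (i : Int)) (some ((i : Int) + 4))) = none) :
    convSuf (s.drop i) = s[i] :: convSuf (s.drop (i + 1)) := by
  have hdrop : s.drop i = s[i] :: s.drop (i + 1) := List.drop_eq_getElem_cons h
  rw [conv_slice_eq, hdrop] at hlook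
  rw [hdrop, convSuf]
  simp only [hlook]

lemma convLoopB_eq_suf (s : List Char) (i : Nat) : convLoopB s i = convSuf (s.drop i) := by
  refine convLoopB.induct s (fun j => convLoopB s j = convSuf (s.drop j)) ?_ ?_ ?_ i
  · intro x h sym hlook ih
    rw [convLoopB, dif_pos h]
    simp only [hlook]
    rw [ih, convSuf_token h hlook]
  · intro x h hlook ih
    rw [convLoopB, dif_pos h]
    simp only [hlook]
    rw [ih, convSuf_plain h hlook]
  · intro x h
    rw [convLoopB, dif_neg h, List.drop_eq_nil_of_le (by omega), convSuf]

-- the splice step of A: its loop on the spliced string equals the untouched prefix ++ B's pass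
lemma convLoopA_step {s : List Char} {count : Nat} {sym : Char}
    (h : count < s.length)
    (hlook : convSymbols.get? (PySem.List.slice s (some (count : Int)) (some ((count : Int) + 4)))
        = some sym)
    (hIH : convLoopA (s.take count ++ sym :: s.drop (count + 4)) (count + 1)
         = (s.take count ++ sym :: s.drop (count + 4)).take (count + 1)
           ++ convSuf ((s.take count ++ sym :: s.drop (count + 4)).drop (count + 1))) :
    convLoopA (s.take count ++ sym :: s.drop (count + 4)) (count + 1)
      = s.take count ++ convSuf (s.drop count) := by
  have hlen : (s.take count).length = count := by
    simp [List.length_take]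
    omega
  have htake : (s.take count ++ sym :: s.drop (count + 4)).take (count + 1)
      = s.take count ++ [sym] := by
    rw [List.take_append, hlen]
    simp [List.take_take]
  have hdrop2 : (s.take count ++ sym :: s.drop (count + 4)).drop (count + 1)
      = s.drop (count + 4) := by
    rw [List.drop_append, hlen]
    simp
  rw [hIH, htake, hdrop2, convSuf_token h hlook, List.append_assoc]
  rfl

-- main invariant: A's loop on the current string = untouched prefix ++ B's pass over the suffix
lemma convLoopA_eq (s : List Char) (count : Nat) :
    convLoopA s count = s.take count ++ convSuf (s.drop count) := by
  induction s, count using convLoopA.induct with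
  | case1 s count h hd h1 ih =>
    rw [convLoopA, dif_pos h, if_pos hd, dif_pos h1]
    exact convLoopA_step h (by rw [h1]; decide) ih
  | case2 s count h hd h1 h2 ih =>
    rw [convLoopA, dif_pos h, if_pos hd, dif_neg h1, dif_pos h2]
    exact convLoopA_step h (by rw [h2]; decide) ih
  | case3 s count h hd h1 h2 h3 ih =>
    rw [convLoopA, dif_pos h, if_pos hd, dif_neg h1, dif_neg h2, dif_pos h3]
    exact convLoopA_step h (by rw [h3]; decide) ih
  | case4 s count h hd h1 h2 h3 h4 ih =>
    rw [convLoopA, dif_pos h, if_pos hd, dif_neg h1, dif_neg h2, dif_neg h3, dif_pos h4]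
    exact convLoopA_step h (by rw [h4]; decide) ih
  | case5 s count h hd h1 h2 h3 h4 h5 ih =>
    rw [convLoopA, dif_pos h, if_pos hd, dif_neg h1, dif_neg h2, dif_neg h3, dif_neg h4, dif_pos h5]
    exact convLoopA_step h (by rw [h5]; decide) ih
  | case6 s count h hd h1 h2 h3 h4 h5 h6 ih =>
    rw [convLoopA, dif_pos h, if_pos hd, dif_neg h1, dif_neg h2, dif_neg h3, dif_neg h4, dif_neg h5,
        dif_pos h6]
    exact convLoopA_step h (by rw [h6]; decide) ih
  | case7 s count h hd h1 h2 h3 h4 h5 h6 ih =>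
    rw [convLoopA, dif_pos h, if_pos hd, dif_neg h1, dif_neg h2, dif_neg h3, dif_neg h4, dif_neg h5,
        dif_neg h6]
    have hnone : convSymbols.get? (PySem.List.slice s (some (count : Int)) (some ((count : Int) + 4)))
        = none := convSymbols_get?_none_of_six h1 h2 h3 h4 h5 h6
    have htk : List.take (count + 1) s = List.take count s ++ [s[count]] := by
      rw [List.take_add_one, List.getElem?_eq_getElem h]
      rfl
    rw [ih, convSuf_plain h hnone, htk, List.append_assoc]
    rfl
  | case8 s count h hd ih =>
    rw [convLoopA, dif_pos h, if_neg hd]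
    have hdrop : s.drop count = s[count] :: s.drop (count + 1) := List.drop_eq_getElem_cons h
    have hnone : convSymbols.get? (PySem.List.slice s (some (count : Int)) (some ((count : Int) + 4)))
        = none := by
      rw [conv_slice_eq, hdrop]
      exact convSymbols_get?_none_of_head _ hd
    have htk : List.take (count + 1) s = List.take count s ++ [s[count]] := by
      rw [List.take_add_one, List.getElem?_eq_getElem h]
      rfl
    rw [ih, convSuf_plain h hnone, htk, List.append_assoc]
    rfl
  | case9 s count h =>
    rw [convLoopA, dif_neg h, List.take_of_length_le (by omega), List.drop_eq_nil_of_le (by omega),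
        convSuf]
    simp

-- ===== VERDICT (by name: the statement is the Claim_ definition above) =====
theorem ConvertToSymbols_spec : Claim_equal_ConvertToSymbols := by
  intro s _
  unfold Spec_ConvertToSymbols ConvertToSymbols ConvertToSymbols_alt
  rw [convLoopA_eq, convLoopB_eq_suf]
  simp
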